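-- pv_equiv track=rewrite | github.com/unsolomon/algorithm_study | 프로그래머스/0/181874. A 강조하기/A 강조하기.py | solution
-- ===== SOURCE A (Python) =====
-- def solution(myString):
--     answer = ''
--     for i in myString:
--         if i == 'a':
--             answer += 'A'
--         elif i.isupper() and i != 'A':
--             answer += i.lower()
--         else:
--             answer += i
--     return answer
-- ===== SOURCE B (Python) =====
-- def solution(myString):
--     return myString.lower().replace('a', 'A')
-- ===== Notes on version B (the rewrite author's own statement) =====
-- stated objective: faster
-- what changed: Replaces A's per-character conditional loop with string accumulation by two whole-string library passes: lowercase everything, then replace every 'a' with 'A'.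
import Mathlib
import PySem

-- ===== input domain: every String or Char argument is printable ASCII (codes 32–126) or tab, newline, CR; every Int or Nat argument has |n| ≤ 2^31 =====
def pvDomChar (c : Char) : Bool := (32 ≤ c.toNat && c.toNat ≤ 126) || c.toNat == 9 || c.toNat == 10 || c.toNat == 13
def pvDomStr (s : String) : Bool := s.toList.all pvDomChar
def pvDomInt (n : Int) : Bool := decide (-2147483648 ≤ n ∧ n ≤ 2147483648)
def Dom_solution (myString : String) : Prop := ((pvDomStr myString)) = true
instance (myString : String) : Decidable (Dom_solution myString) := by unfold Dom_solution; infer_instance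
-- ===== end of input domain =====

-- B replaces A's per-character conditional loop with two whole-string library passes
-- (lowercase, then replace 'a' by 'A'); equivalence is proved for all inputs.

-- ===== PORT A =====
-- answer = ''; for i in myString: append 'A' / i.lower() / i per the branch; return answer
def solution (myString : String) : String :=
  String.ofList (myString.toList.foldl (fun answer i =>
    answer ++ (if i = 'a' then ['A']
               else if PySem.Chars.isupper i && i != 'A' then [PySem.Chars.lowerChar i]
               else [i])) [])

-- ===== PORT B =====
def solution_alt (myString : String) : String :=
  PySem.Str.replace (PySem.Str.lower myString) "a" "A"

-- ===== PRECONDITION & SPEC =====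
def Spec_solution (myString : String) (out : String) : Prop := out = solution_alt myString
instance (myString : String) (out : String) : Decidable (Spec_solution myString out) := by unfold Spec_solution; infer_instance

-- ===== CLAIM (what is proved, stated in full; the proofs are below) =====
def Claim_equal_solution : Prop := ∀ (myString : String), Dom_solution myString → Spec_solution myString (solution myString)

-- ===== LEMMAS AND PROOFS =====

-- A's per-character branch, as a function
def pvStepA (i : Char) : Char :=
  if i = 'a' then 'A'
  else if PySem.Chars.isupper i && i != 'A' then PySem.Chars.lowerChar i
  else i

-- single-character replace is a map (on the replace.go worker, fuel ≥ remaining length)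
theorem pv_replace_go_map (l acc : List Char) (fuel : Nat) (h : l.length ≤ fuel) :
    PySem.Chars.replace.go ['a'] ['A'] fuel l acc
      = acc.reverse ++ l.map (fun c => if c = 'a' then 'A' else c) := by
  induction l generalizing acc fuel with
  | nil =>
    cases fuel <;> simp [PySem.Chars.replace.go]
  | cons c t ih =>
    cases fuel with
    | zero => simp at h
    | succ fuel =>
      simp only [PySem.Chars.replace.go]
      have hp : List.isPrefixOf ['a'] (c :: t) = ('a' == c && true) := rfl
      by_cases hc : c = 'a'
      · subst hc
        rw [if_pos (by rw [hp]; simp)]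
        show PySem.Chars.replace.go ['a'] ['A'] fuel t ('A' :: acc) = _
        rw [ih _ fuel (by simpa using Nat.le_of_succ_le_succ h)]
        simp
      · rw [if_neg (by rw [hp]; simp only [Bool.and_true]; exact fun h => hc (eq_of_beq h).symm)]
        rw [ih _ fuel (by simpa using Nat.le_of_succ_le_succ h)]
        simp [hc]

theorem pv_replace_map (s : List Char) :
    PySem.Chars.replace s ['a'] ['A'] = s.map (fun c => if c = 'a' then 'A' else c) := by
  rw [PySem.Chars.replace]
  simp only [List.isEmpty_cons, if_false, Bool.false_eq_true]
  exact pv_replace_go_map s [] s.length le_rfl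

-- pointwise: lowercasing then 'a'→'A' equals A's branch, for every character
theorem pv_pointwise (c : Char) :
    (if PySem.Chars.lowerChar c = 'a' then 'A' else PySem.Chars.lowerChar c) = pvStepA c := by
  unfold pvStepA PySem.Chars.lowerChar PySem.Chars.isupper
  by_cases hA : c = 'A'
  · subst hA; decide
  by_cases hca : c = 'a'
  · subst hca; decide
  by_cases hup : ('A' ≤ c ∧ c ≤ 'Z')
  · have h1 : 65 ≤ c.toNat := Nat.succ_le_of_lt hup.1
    have h2 : c.toNat ≤ 90 := hup.2
    have h65 : c.toNat ≠ 65 := fun h => hA (by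
      have : c = Char.ofNat c.toNat := (Char.ofNat_toNat c).symm
      rw [h] at this; exact this)
    have htn : (Char.ofNat (c.toNat + 32)).toNat = c.toNat + 32 := by
      rw [Char.toNat_ofNat, if_pos (Or.inl (by omega))]
    have hne : Char.ofNat (c.toNat + 32) ≠ 'a' := fun h => by
      have := congrArg Char.toNat h
      rw [htn] at this
      have h97 : 'a'.toNat = 97 := rfl
      rw [h97] at this
      exact h65 (by omega)
    simp [hup.1, hup.2, hca, hA, hne]
  · rcases Decidable.not_and_iff_or_not.mp hup with h | h <;> simp [hca, h]

theorem pv_toList_eq (cs : List Char) :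
    (cs.map PySem.Chars.lowerChar).map (fun c => if c = 'a' then 'A' else c)
      = cs.map pvStepA := by
  rw [List.map_map]
  exact List.map_congr_left (fun c _ => pv_pointwise c)

-- ===== VERDICT (by name: the statement is the Claim_ definition above) =====
theorem solution_spec : Claim_equal_solution := by
  intro s _
  unfold Spec_solution solution solution_alt
  have hstep : (fun (answer : List Char) (i : Char) =>
      answer ++ (if i = 'a' then ['A']
                 else if PySem.Chars.isupper i && i != 'A' then [PySem.Chars.lowerChar i]
                 else [i]))
      = fun answer i => answer ++ [pvStepA i] := by
    funext a i; unfold pvStepA; split_ifs <;> rfl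
  rw [hstep, PySem.List.foldl_append_singleton_eq_map]
  have hR : (PySem.Str.replace (PySem.Str.lower s) "a" "A").toList = s.toList.map pvStepA := by
    rw [PySem.Str.toList_replace]
    show PySem.Chars.replace ((PySem.Str.lower s).toList) ['a'] ['A'] = _
    rw [PySem.Str.toList_lower]
    unfold PySem.Chars.lower
    rw [pv_replace_map, pv_toList_eq]
  calc String.ofList (s.toList.map pvStepA)
      = String.ofList ((PySem.Str.replace (PySem.Str.lower s) "a" "A").toList) := by rw [hR]
    _ = _ := String.ofList_toList
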